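-- pv_equiv track=rewrite | github.com/kden/sunlight_sensor_gcp | functions/cassandra_sse_stream/src/main.py | has_data_changed
-- ===== SOURCE A (Python) =====
-- from typing import Dict, Any, Optional
--
-- def has_data_changed(old_data: Optional[Dict], new_data: Optional[Dict]) -> bool:
--     """
--     Check if sensor data has changed by comparing last_seen timestamps.
--
--     Args:
--         old_data: Previous readings dictionary
--         new_data: New readings dictionary
--
--     Returns:
--         True if data has changed, False otherwise
--     """
--     if old_data is None or new_data is None:
--         return True
--
--     if set(old_data.keys()) != set(new_data.keys()):
--         return True
--
--     for sensor_id in new_data: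
--         old_last_seen = old_data.get(sensor_id, {}).get('last_seen')
--         new_last_seen = new_data.get(sensor_id, {}).get('last_seen')
--
--         if old_last_seen != new_last_seen:
--             return True
--
--     return False
-- ===== SOURCE B (Python) =====
-- def has_data_changed(old_data, new_data):
--     # Changed iff some (sensor_id, last_seen) snapshot pair appears on exactly one side.
--     if old_data is None or new_data is None:
--         return True
--     old_snap = {(sid, entry.get('last_seen')) for sid, entry in old_data.items()}
--     new_snap = {(sid, entry.get('last_seen')) for sid, entry in new_data.items()}
--     return bool(old_snap ^ new_snap)
-- ===== Notes on version B (the rewrite author's own statement) =====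
-- stated objective: simpler
-- what changed: Instead of A's key-set equality check followed by a per-key lookup loop with early return, B hashes each dict into a set of (sensor_id, last_seen) pairs and reports change iff the symmetric difference of the two snapshot sets is nonempty.
import Mathlib
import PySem

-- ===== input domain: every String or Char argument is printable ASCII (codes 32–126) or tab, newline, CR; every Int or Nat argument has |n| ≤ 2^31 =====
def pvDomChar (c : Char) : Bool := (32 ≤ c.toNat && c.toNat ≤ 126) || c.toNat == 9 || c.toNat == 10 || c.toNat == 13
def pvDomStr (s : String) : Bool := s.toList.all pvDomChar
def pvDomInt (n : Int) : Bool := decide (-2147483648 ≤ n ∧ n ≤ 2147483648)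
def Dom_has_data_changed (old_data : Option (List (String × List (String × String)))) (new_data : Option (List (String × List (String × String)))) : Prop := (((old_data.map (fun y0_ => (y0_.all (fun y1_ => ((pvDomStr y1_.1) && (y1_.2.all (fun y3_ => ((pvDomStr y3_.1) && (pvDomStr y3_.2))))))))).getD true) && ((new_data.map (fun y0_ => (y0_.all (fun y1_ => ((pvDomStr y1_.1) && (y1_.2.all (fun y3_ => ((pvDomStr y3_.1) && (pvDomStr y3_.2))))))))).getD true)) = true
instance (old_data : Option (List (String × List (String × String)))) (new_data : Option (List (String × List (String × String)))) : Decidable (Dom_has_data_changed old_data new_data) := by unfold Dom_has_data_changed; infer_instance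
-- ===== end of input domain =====

-- B replaces A's key-set check + per-key lookup loop by hashing each dict into a set of
-- (sensor_id, last_seen) pairs and testing whether the symmetric difference is nonempty
-- (objective: simpler).

-- ===== PORT A =====
-- the 'for sensor_id in new_data' loop with its early 'return True'
def pvLoopA (odd ndd : PySem.Dict String (List (String × String))) : List String → Bool
  | [] => false
  | sid :: rest =>
    let old_last_seen := (PySem.Dict.mk (odd.getD sid [])).get? "last_seen"
    let new_last_seen := (PySem.Dict.mk (ndd.getD sid [])).get? "last_seen"
    if old_last_seen ≠ new_last_seen then true else pvLoopA odd ndd rest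

def has_data_changed (old_data : Option (List (String × List (String × String)))) (new_data : Option (List (String × List (String × String)))) : Bool :=
  match old_data, new_data with
  | none, _ => true
  | _, none => true
  | some od, some nd =>
    let odd := PySem.Dict.mk od
    let ndd := PySem.Dict.mk nd
    if !(PySem.Set.equal (PySem.Set.ofList odd.keys) (PySem.Set.ofList ndd.keys)) then true
    else pvLoopA odd ndd ndd.keys

-- ===== PORT B =====
-- {(sid, entry.get('last_seen')) for sid, entry in data.items()}
def pvSnap (data : List (String × List (String × String))) : PySem.Set (String × Option String) :=
  PySem.Set.ofList (data.map (fun p => (p.1, (PySem.Dict.mk p.2).get? "last_seen")))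

def has_data_changed_alt (old_data : Option (List (String × List (String × String)))) (new_data : Option (List (String × List (String × String)))) : Bool :=
  match old_data, new_data with
  | none, _ => true
  | _, none => true
  | some od, some nd =>
    let old_snap := pvSnap od
    let new_snap := pvSnap nd
    -- bool(old_snap ^ new_snap): True iff the symmetric difference is nonempty
    !(PySem.Set.len (PySem.Set.symmDiff old_snap new_snap) == 0)

-- ===== PRECONDITION & SPEC =====
-- Pre_ excludes association lists with duplicate keys (outer or inner): such lists do not
-- correspond to any Python dict, and which occurrence a lookup sees there is accidental.
def pvNodupKeys (o : Option (List (String × List (String × String)))) : Bool :=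
  o.elim true (fun l => decide (l.map Prod.fst).Nodup && l.all (fun p => decide (p.2.map Prod.fst).Nodup))

def Pre_has_data_changed (old_data : Option (List (String × List (String × String)))) (new_data : Option (List (String × List (String × String)))) : Prop :=
  pvNodupKeys old_data = true ∧ pvNodupKeys new_data = true
instance (old_data : Option (List (String × List (String × String)))) (new_data : Option (List (String × List (String × String)))) : Decidable (Pre_has_data_changed old_data new_data) := by unfold Pre_has_data_changed; infer_instance

def pvWitness_has_data_changed : (Option (List (String × List (String × String)))) × (Option (List (String × List (String × String)))) :=
  (some [("s1", [("last_seen", "t1")])], some [("s1", [("last_seen", "t2")])])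

def Spec_has_data_changed (old_data : Option (List (String × List (String × String)))) (new_data : Option (List (String × List (String × String)))) (out : Bool) : Prop := out = has_data_changed_alt old_data new_data
instance (old_data : Option (List (String × List (String × String)))) (new_data : Option (List (String × List (String × String)))) (out : Bool) : Decidable (Spec_has_data_changed old_data new_data out) := by unfold Spec_has_data_changed; infer_instance

-- ===== CLAIM (what is proved, stated in full; the proofs are below) =====
def Claim_equal_has_data_changed : Prop := ∀ (old_data : Option (List (String × List (String × String)))) (new_data : Option (List (String × List (String × String)))), Dom_has_data_changed old_data new_data → Pre_has_data_changed old_data new_data → Spec_has_data_changed old_data new_data (has_data_changed old_data new_data)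

-- ===== LEMMAS AND PROOFS =====

theorem pair_mem_of_mem {a b : Type} (l : List (a × b)) {p : a × b} {k : a}
    (hp : p ∈ l) (hk : p.1 = k) : (k, p.2) ∈ l := by rw [← hk]; simpa using hp

-- A's loop is an 'any' over the iterated keys
theorem pvLoopA_eq_any (odd ndd : PySem.Dict String (List (String × String))) (l : List String) :
    pvLoopA odd ndd l = l.any (fun sid =>
      !((PySem.Dict.mk (odd.getD sid [])).get? "last_seen"
          == (PySem.Dict.mk (ndd.getD sid [])).get? "last_seen")) := by
  induction l with
  | nil => simp [pvLoopA]
  | cons sid rest ih =>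
    simp only [pvLoopA, List.any_cons, ← ih]
    by_cases h : (PySem.Dict.mk (odd.getD sid [])).get? "last_seen"
        = (PySem.Dict.mk (ndd.getD sid [])).get? "last_seen" <;> simp [h]

-- membership in a snapshot, over nodup keys, is a successful lookup
theorem mem_snap_iff (od : List (String × List (String × String)))
    (h : (od.map Prod.fst).Nodup) (k : String) (v : Option String) :
    (k, v) ∈ pvSnap od ↔ ∃ u, (PySem.Dict.mk od).get? k = some u ∧ v = (PySem.Dict.mk u).get? "last_seen" := by
  rw [pvSnap, PySem.Set.mem_ofList, List.mem_map]
  constructor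
  · rintro ⟨p, hp, heq⟩
    have h1 : p.1 = k := congrArg Prod.fst heq
    have h2 : (PySem.Dict.mk p.2).get? "last_seen" = v := congrArg Prod.snd heq
    refine ⟨p.2, ?_, h2.symm⟩
    exact PySem.Dict.get?_of_mem_items _ (pair_mem_of_mem _ hp h1) (by simpa [PySem.Dict.keys] using h)
  · rintro ⟨u, hu, hv⟩
    have := PySem.Dict.mem_items_of_get?_eq_some _ hu
    exact ⟨(k, u), by simpa [PySem.Dict.items] using this, by simp [hv]⟩

-- the symmetric-difference test B makes is pointwise set disagreement
theorem symmDiff_len_ne_zero_iff (s t : PySem.Set (String × Option String)) :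
    (!(PySem.Set.len (PySem.Set.symmDiff s t) == 0)) = true ↔ ¬ (∀ x, x ∈ s ↔ x ∈ t) := by
  have hlen : (PySem.Set.len (PySem.Set.symmDiff s t) == 0) = true ↔ PySem.Set.symmDiff s t = [] := by
    cases h : PySem.Set.symmDiff s t
    · simp [PySem.Set.len]
    · simp only [PySem.Set.len]
      constructor
      · intro hh; exfalso; simp at hh; omega
      · intro hh; simp at hh
  constructor
  · intro hb hall
    rw [Bool.not_eq_eq_eq_not, Bool.not_true] at hb
    have : PySem.Set.symmDiff s t ≠ [] := fun he => by rw [hlen.mpr he] at hb; simp at hb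
    obtain ⟨x, hx⟩ := List.exists_mem_of_ne_nil _ this
    rcases (PySem.Set.mem_symmDiff _ _ _).mp hx with ⟨h1, h2⟩ | ⟨h1, h2⟩
    · exact h2 ((hall x).mp h1)
    · exact h2 ((hall x).mpr h1)
  · intro hne
    by_contra hb
    rw [Bool.not_eq_eq_eq_not, Bool.not_true, Bool.not_eq_false] at hb
    have he := hlen.mp hb
    refine hne (fun x => ?_)
    constructor <;> intro hx
    · by_contra hnx
      have : x ∈ PySem.Set.symmDiff s t := (PySem.Set.mem_symmDiff _ _ _).mpr (Or.inl ⟨hx, hnx⟩)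
      rw [he] at this; simp at this
    · by_contra hnx
      have : x ∈ PySem.Set.symmDiff s t := (PySem.Set.mem_symmDiff _ _ _).mpr (Or.inr ⟨hx, hnx⟩)
      rw [he] at this; simp at this

theorem has_data_changed_spec : Claim_equal_has_data_changed := by
  intro old_data new_data _ hpre
  unfold Spec_has_data_changed
  match old_data, new_data with
  | none, _ => rfl
  | some od, none => rfl
  | some od, some nd =>
    obtain ⟨ho, hn⟩ := hpre
    simp only [pvNodupKeys, Option.elim, Bool.and_eq_true, decide_eq_true_eq] at ho hn
    have hON := ho.1; have hNN := hn.1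
    show has_data_changed (some od) (some nd) = has_data_changed_alt (some od) (some nd)
    have hkoA : (PySem.Dict.mk od).keys = od.map Prod.fst := by simp [PySem.Dict.keys]
    have hknA : (PySem.Dict.mk nd).keys = nd.map Prod.fst := by simp [PySem.Dict.keys]
    -- each side as a Prop
    have hBiff := symmDiff_len_ne_zero_iff (pvSnap od) (pvSnap nd)
    simp only [has_data_changed, has_data_changed_alt]
    -- characterise A = true
    have hAiff : (if !(PySem.Set.equal (PySem.Set.ofList (PySem.Dict.mk od).keys) (PySem.Set.ofList (PySem.Dict.mk nd).keys)) then true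
        else pvLoopA (PySem.Dict.mk od) (PySem.Dict.mk nd) (PySem.Dict.mk nd).keys) = true ↔
        ¬ ((∀ x, x ∈ od.map Prod.fst ↔ x ∈ nd.map Prod.fst) ∧
          ∀ sid ∈ nd.map Prod.fst,
            (PySem.Dict.mk ((PySem.Dict.mk od).getD sid [])).get? "last_seen"
              = (PySem.Dict.mk ((PySem.Dict.mk nd).getD sid [])).get? "last_seen") := by
      rw [hkoA, hknA]
      by_cases hs : PySem.Set.equal (PySem.Set.ofList (od.map Prod.fst)) (PySem.Set.ofList (nd.map Prod.fst)) = true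
      · have hmem : ∀ x : String, x ∈ od.map Prod.fst ↔ x ∈ nd.map Prod.fst := by
          intro x
          have := (PySem.Set.equal_iff _ _).mp hs x
          simpa [PySem.Set.mem_ofList] using this
        rw [hs]
        simp only [Bool.not_true, Bool.false_eq_true, if_false, pvLoopA_eq_any, List.any_eq_true]
        constructor
        · rintro ⟨sid, hsid, hx⟩ ⟨_, hvals⟩
          exact absurd (hvals sid hsid) (by simpa using hx)
        · intro hnot
          by_contra hno
          push Not at hno
          refine hnot ⟨hmem, fun sid hsid => ?_⟩
          have := hno sid hsid
          simpa using this
      · rw [Bool.not_eq_true] at hs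
        simp only [hs, Bool.not_false, if_true, true_iff]
        intro ⟨hkeys, _⟩
        have ht : PySem.Set.equal (PySem.Set.ofList (od.map Prod.fst)) (PySem.Set.ofList (nd.map Prod.fst)) = true := by
          rw [PySem.Set.equal_iff]; intro x; simpa [PySem.Set.mem_ofList] using hkeys x
        rw [hs] at ht; exact Bool.false_ne_true ht
    -- characterise B's pointwise condition against A's
    have hcond : (∀ x : String × Option String, x ∈ pvSnap od ↔ x ∈ pvSnap nd) ↔
        ((∀ x, x ∈ od.map Prod.fst ↔ x ∈ nd.map Prod.fst) ∧
          ∀ sid ∈ nd.map Prod.fst,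
            (PySem.Dict.mk ((PySem.Dict.mk od).getD sid [])).get? "last_seen"
              = (PySem.Dict.mk ((PySem.Dict.mk nd).getD sid [])).get? "last_seen") := by
      constructor
      · intro H
        have hkeys : ∀ x, x ∈ od.map Prod.fst ↔ x ∈ nd.map Prod.fst := by
          intro k
          constructor <;> intro hk
          · obtain ⟨p, hp, hpk⟩ := List.mem_map.mp hk
            obtain ⟨u, hu, _⟩ := (mem_snap_iff nd hNN k _).mp
              ((H _).mp ((mem_snap_iff od hON k _).mpr ⟨p.2,
                PySem.Dict.get?_of_mem_items _ (pair_mem_of_mem _ hp hpk)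
                  (by simpa [PySem.Dict.keys] using hON), rfl⟩))
            have := PySem.Dict.mem_items_of_get?_eq_some _ hu
            exact List.mem_map.mpr ⟨(k, u), by simpa [PySem.Dict.items] using this, rfl⟩
          · obtain ⟨p, hp, hpk⟩ := List.mem_map.mp hk
            obtain ⟨u, hu, _⟩ := (mem_snap_iff od hON k _).mp
              ((H _).mpr ((mem_snap_iff nd hNN k _).mpr ⟨p.2,
                PySem.Dict.get?_of_mem_items _ (pair_mem_of_mem _ hp hpk)
                  (by simpa [PySem.Dict.keys] using hNN), rfl⟩))
            have := PySem.Dict.mem_items_of_get?_eq_some _ hu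
            exact List.mem_map.mpr ⟨(k, u), by simpa [PySem.Dict.items] using this, rfl⟩
        refine ⟨hkeys, fun sid hsidN => ?_⟩
        obtain ⟨pn, hpn, hpnk⟩ := List.mem_map.mp hsidN
        have hgn : (PySem.Dict.mk nd).get? sid = some pn.2 :=
          PySem.Dict.get?_of_mem_items _ (pair_mem_of_mem _ hpn hpnk)
            (by simpa [PySem.Dict.keys] using hNN)
        obtain ⟨u, hgo, hv⟩ := (mem_snap_iff od hON sid _).mp
          ((H _).mpr ((mem_snap_iff nd hNN sid _).mpr ⟨pn.2, hgn, rfl⟩))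
        rw [PySem.Dict.getD_eq_get?_getD, PySem.Dict.getD_eq_get?_getD, hgo, hgn]
        simpa using hv.symm
      · rintro ⟨hkeys, hvals⟩ ⟨k, v⟩
        rw [mem_snap_iff od hON, mem_snap_iff nd hNN]
        constructor
        · rintro ⟨u, hu, hv⟩
          have hkO : k ∈ od.map Prod.fst := by
            have := PySem.Dict.mem_items_of_get?_eq_some _ hu
            exact List.mem_map.mpr ⟨(k, u), by simpa [PySem.Dict.items] using this, rfl⟩
          have hkN : k ∈ nd.map Prod.fst := (hkeys k).mp hkO
          obtain ⟨p, hp, hpk⟩ := List.mem_map.mp hkN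
          have hgn : (PySem.Dict.mk nd).get? k = some p.2 :=
            PySem.Dict.get?_of_mem_items _ (pair_mem_of_mem _ hp hpk)
              (by simpa [PySem.Dict.keys] using hNN)
          refine ⟨p.2, hgn, ?_⟩
          have := hvals k hkN
          rw [PySem.Dict.getD_eq_get?_getD, PySem.Dict.getD_eq_get?_getD, hu, hgn] at this
          simpa [hv] using this
        · rintro ⟨u, hu, hv⟩
          have hkN : k ∈ nd.map Prod.fst := by
            have := PySem.Dict.mem_items_of_get?_eq_some _ hu
            exact List.mem_map.mpr ⟨(k, u), by simpa [PySem.Dict.items] using this, rfl⟩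
          have hkO : k ∈ od.map Prod.fst := (hkeys k).mpr hkN
          obtain ⟨p, hp, hpk⟩ := List.mem_map.mp hkO
          have hgo : (PySem.Dict.mk od).get? k = some p.2 :=
            PySem.Dict.get?_of_mem_items _ (pair_mem_of_mem _ hp hpk)
              (by simpa [PySem.Dict.keys] using hON)
          refine ⟨p.2, hgo, ?_⟩
          have := hvals k hkN
          rw [PySem.Dict.getD_eq_get?_getD, PySem.Dict.getD_eq_get?_getD, hu, hgo] at this
          rw [hv]; exact this.symm
    -- both sides are Bools with the same truth condition
    rw [Bool.eq_iff_iff, hAiff, hBiff, hcond]
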